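-- pv_equiv track=rewrite | github.com/mlegoue/convex | Concept/concept.py | find_extension
-- ===== SOURCE A (Python) =====
-- def find_extension(objets, intention):
--     extension = []
--     for objet in objets:
--         in_attribut = True
--         for attribut in intention:
--             if objet not in attribut:
--                 in_attribut = False
--         if in_attribut:
--             extension.append(objet)
--     return extension
-- ===== SOURCE B (Python) =====
-- def find_extension(objets, intention):
--     if not intention:
--         return list(objets)
--     common = set(intention[0])
--     for attribut in intention[1:]:
--         common = common.intersection(attribut)
--     return [objet for objet in objets if objet in common]
-- ===== Notes on version B (the rewrite author's own statement) =====
-- stated objective: faster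
-- what changed: B precomputes the intersection of all attribut lists as one hash set and then filters objets in a single membership pass, instead of A's nested per-objet scan over every attribut list.
import Mathlib
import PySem

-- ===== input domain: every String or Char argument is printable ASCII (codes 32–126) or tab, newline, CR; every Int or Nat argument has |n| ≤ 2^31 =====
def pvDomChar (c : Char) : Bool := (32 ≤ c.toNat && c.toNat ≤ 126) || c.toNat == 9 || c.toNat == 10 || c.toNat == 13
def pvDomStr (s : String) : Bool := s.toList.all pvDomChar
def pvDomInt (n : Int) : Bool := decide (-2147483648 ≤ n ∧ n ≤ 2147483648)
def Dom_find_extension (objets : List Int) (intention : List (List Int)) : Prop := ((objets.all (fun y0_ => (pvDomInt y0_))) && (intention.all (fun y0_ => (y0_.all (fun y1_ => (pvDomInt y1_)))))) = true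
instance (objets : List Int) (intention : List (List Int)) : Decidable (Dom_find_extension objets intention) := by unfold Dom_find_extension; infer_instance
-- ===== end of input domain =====

-- B precomputes the intersection of all attribut lists once and filters objets in one pass (faster than A's nested scans).
-- ===== PORT A =====
def find_extension (objets : List Int) (intention : List (List Int)) : List Int :=
  objets.foldl (fun extension objet =>
    let in_attribut :=
      intention.foldl (fun b attribut => if ¬ attribut.contains objet then false else b) true
    if in_attribut then extension ++ [objet] else extension) []

-- ===== PORT B =====
def find_extension_alt (objets : List Int) (intention : List (List Int)) : List Int :=
  match intention with
  | [] => objets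
  | h :: t =>
    let common : PySem.Set Int := t.foldl (fun s attribut => PySem.Set.inter s attribut) (PySem.Set.ofList h)
    objets.filter (fun objet => common.contains objet)

-- ===== PRECONDITION & SPEC =====
def Spec_find_extension (objets : List Int) (intention : List (List Int)) (out : List Int) : Prop := out = find_extension_alt objets intention
instance (objets : List Int) (intention : List (List Int)) (out : List Int) : Decidable (Spec_find_extension objets intention out) := by unfold Spec_find_extension; infer_instance

-- ===== CLAIM (what is proved, stated in full; the proofs are below) =====
def Claim_equal_find_extension : Prop := ∀ (objets : List Int) (intention : List (List Int)), Dom_find_extension objets intention → Spec_find_extension objets intention (find_extension objets intention)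

-- ===== LEMMAS AND PROOFS =====

-- A's inner loop over intention computes "objet is in every attribut".
theorem inner_fold_eq_all (o : Int) (l : List (List Int)) (b : Bool) :
    l.foldl (fun b attribut => if ¬ attribut.contains o then false else b) b
      = (b && l.all (fun attribut => attribut.contains o)) := by
  induction l generalizing b with
  | nil => simp
  | cons a t ih =>
    simp only [List.foldl_cons, List.all_cons]
    rw [ih]
    cases b <;> cases hc : a.contains o <;> simp

-- A is a filter by "in every attribut"
theorem A_eq_filter (objets : List Int) (intention : List (List Int)) :
    find_extension objets intention
      = objets.filter (fun o => intention.all (fun a => a.contains o)) := by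
  unfold find_extension
  have hf : (fun (extension : List Int) (objet : Int) =>
        let in_attribut := intention.foldl (fun b attribut => if ¬ attribut.contains objet then false else b) true
        if in_attribut then extension ++ [objet] else extension)
      = fun extension objet => if (intention.all fun a => a.contains objet) then extension ++ [objet] else extension := by
    funext ext o
    simp only []
    rw [inner_fold_eq_all]
    simp
  rw [hf, PySem.List.foldl_append_if_eq_filter]
  simp

-- membership in B's folded intersection
theorem contains_fold_inter (o : Int) (t : List (List Int)) (s : PySem.Set Int) :
    (t.foldl (fun s attribut => PySem.Set.inter s attribut) s).contains o
      = (s.contains o && t.all (fun attribut => attribut.contains o)) := by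
  induction t generalizing s with
  | nil => simp
  | cons a t ih =>
    simp only [List.foldl_cons, List.all_cons]
    rw [ih]
    have h : (PySem.Set.inter s a).contains o = (s.contains o && a.contains o) := by
      by_cases hs : o ∈ s <;> by_cases ha : o ∈ a <;>
        simp [PySem.Set.mem_inter, hs, ha]
    rw [h, Bool.and_assoc]

-- ===== VERDICT (by name: the statement is the Claim_ definition above) =====
theorem find_extension_spec : Claim_equal_find_extension := by
  intro objets intention _
  unfold Spec_find_extension find_extension_alt
  rw [A_eq_filter]
  cases intention with
  | nil => simp
  | cons h t =>
    simp only []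
    apply List.filter_congr
    intro o _
    rw [contains_fold_inter]
    simp [List.all_cons, PySem.Set.mem_ofList]
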